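-- pv_equiv track=rewrite | github.com/skinred78/neuro-db-2 | scripts/extract_ninds_terms.py | group_by_letter
-- ===== SOURCE A (Python) =====
-- from collections import defaultdict
--
-- def group_by_letter(terms):
--     """Group terms by their first letter."""
--     grouped = defaultdict(list)
--
--     for term_data in terms:
--         first_letter = term_data['term'][0].upper()
--         grouped[first_letter].append(term_data)
--
--     # Sort terms within each letter
--     for letter in grouped:
--         grouped[letter].sort(key=lambda x: x['term'].lower())
--
--     return dict(grouped)
-- ===== SOURCE B (Python) =====
-- def group_by_letter(terms):
--     """Group terms by their first letter."""
--     # distinct first letters, in first-appearance order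
--     letters = []
--     for term_data in terms:
--         letter = term_data['term'][0].upper()
--         if letter not in letters:
--             letters.append(letter)
--     # for each letter, pick out and sort its terms directly
--     return {letter: sorted((td for td in terms if td['term'][0].upper() == letter),
--                            key=lambda x: x['term'].lower())
--             for letter in letters}
-- ===== Notes on version B (the rewrite author's own statement) =====
-- stated objective: alternative
-- what changed: B builds no dict of buckets at all: it collects the distinct first letters in one pass, then for each letter filters the input and sorts that sublist, instead of A's mutate-a-defaultdict-then-sort-each-bucket scheme.
import Mathlib
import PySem

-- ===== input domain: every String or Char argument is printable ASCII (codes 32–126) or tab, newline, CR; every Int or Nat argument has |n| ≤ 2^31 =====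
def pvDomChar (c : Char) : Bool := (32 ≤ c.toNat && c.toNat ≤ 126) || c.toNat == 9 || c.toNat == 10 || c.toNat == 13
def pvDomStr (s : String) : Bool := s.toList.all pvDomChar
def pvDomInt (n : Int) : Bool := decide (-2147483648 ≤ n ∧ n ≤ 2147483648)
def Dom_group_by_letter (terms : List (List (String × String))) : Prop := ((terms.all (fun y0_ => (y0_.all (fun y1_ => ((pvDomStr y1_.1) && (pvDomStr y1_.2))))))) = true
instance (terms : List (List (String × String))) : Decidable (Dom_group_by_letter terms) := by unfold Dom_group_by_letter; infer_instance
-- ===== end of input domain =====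

-- B builds no bucket dict at all: one pass collects the distinct first letters in order,
-- then each letter's terms are filtered out of the input and sorted; same value, no speed claim.

-- shared accessors: td['term'] (totalised with "" outside Pre_), its first letter uppercased,
-- and the lower-cased sort key
def pvTerm (td : List (String × String)) : String :=
  ((PySem.Dict.mk td).get? "term").getD ""

-- td['term'][0].upper(); Python raises on a missing 'term' key / empty string — excluded by Pre_,
-- "" is returned there only to stay total
def pvLetter (td : List (String × String)) : String :=
  match PySem.Str.pyGet? (pvTerm td) 0 with
  | some c => String.ofList (PySem.Chars.upper [c])
  | none => ""

def pvLow (td : List (String × String)) : String := PySem.Str.lower (pvTerm td)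

-- ===== PORT A =====
-- build defaultdict(list) buckets in input order, then sort each bucket by lower(term)
def group_by_letter (terms : List (List (String × String))) : List (String × List (List (String × String))) :=
  let grouped := terms.foldl (fun d td => d.modify (pvLetter td) [] (fun b => b ++ [td])) PySem.Dict.empty
  grouped.items.map (fun p => (p.1, PySem.List.sorted p.2 pvLow false))

-- ===== PORT B =====
-- collect distinct letters ('letter not in letters' list = a PySem.Set), then comprehension:
-- each letter paired with the sorted filter of the whole input
def group_by_letter_alt (terms : List (List (String × String))) : List (String × List (List (String × String))) :=
  let letters : PySem.Set String := terms.foldl (fun s td => PySem.Set.add s (pvLetter td)) PySem.Set.empty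
  letters.map (fun letter =>
    (letter, PySem.List.sorted (terms.filter (fun td => pvLetter td == letter)) pvLow false))

-- ===== PRECONDITION & SPEC =====
-- exactly where Python A returns: every dict has a 'term' key with a nonempty value
-- (otherwise A raises KeyError / IndexError)
def Pre_group_by_letter (terms : List (List (String × String))) : Prop :=
  ∀ td ∈ terms, ((PySem.Dict.mk td).get? "term").getD "" ≠ ""
instance (terms : List (List (String × String))) : Decidable (Pre_group_by_letter terms) := by unfold Pre_group_by_letter; infer_instance

def pvWitness_group_by_letter : (List (List (String × String))) :=
  [[("term", "ataxia"), ("category", "movement")], [("term", "Aphasia")], [("term", "stroke")]]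

def Spec_group_by_letter (terms : List (List (String × String))) (out : List (String × List (List (String × String)))) : Prop := out = group_by_letter_alt terms
instance (terms : List (List (String × String))) (out : List (String × List (List (String × String)))) : Decidable (Spec_group_by_letter terms out) := by unfold Spec_group_by_letter; infer_instance

-- ===== CLAIM (what is proved, stated in full; the proofs are below) =====
def Claim_equal_group_by_letter : Prop := ∀ (terms : List (List (String × String))), Dom_group_by_letter terms → Pre_group_by_letter terms → Spec_group_by_letter terms (group_by_letter terms)

-- ===== LEMMAS AND PROOFS =====

-- the bucket A's grouping fold leaves at key c is the filter of the input
theorem getD_group_fold (l : List (List (String × String)))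
    (d : PySem.Dict String (List (List (String × String)))) (c : String) :
    (l.foldl (fun d td => d.modify (pvLetter td) [] (fun b => b ++ [td])) d).getD c []
      = d.getD c [] ++ l.filter (fun td => pvLetter td == c) := by
  have h := PySem.Dict.getD_foldl_modify_append (l.map (fun td => (pvLetter td, td))) d c
  rw [List.foldl_map] at h
  simpa [List.filter_map, Function.comp_def] using h

-- ===== VERDICT (by name: the statement is the Claim_ definition above) =====
theorem group_by_letter_spec : Claim_equal_group_by_letter := by
  intro terms _ _
  unfold Spec_group_by_letter group_by_letter group_by_letter_alt
  dsimp only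
  set dA := terms.foldl (fun d td => d.modify (pvLetter td) [] (fun b => b ++ [td])) PySem.Dict.empty with hdA
  have hnA : dA.keys.Nodup := by
    rw [hdA]; exact PySem.Dict.nodup_keys_foldl_modify_key _ pvLetter _ _ _ PySem.Dict.nodup_keys_empty
  have hkA : dA.keys = PySem.Set.ofList (terms.map pvLetter) := by
    rw [hdA, PySem.Dict.keys_foldl_modify_key]
    simp [PySem.Dict.keys_empty, PySem.Set.update_nil_left]
  have hB : terms.foldl (fun s td => PySem.Set.add s (pvLetter td)) PySem.Set.empty
      = PySem.Set.ofList (terms.map pvLetter) := by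
    rw [PySem.Set.ofList_eq_foldl, List.foldl_map]
    rfl
  rw [hB, PySem.Dict.items_eq_map_keys dA hnA [], hkA, List.map_map]
  refine List.map_congr_left ?_
  intro c _
  simp only [Function.comp]
  rw [hdA, getD_group_fold]
  simp
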